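-- pv_equiv track=rewrite | github.com/PsiQ/bartiq | src/bartiq/analysis/rewriters/utils.py | _unwrap_linked_symbols
-- ===== SOURCE A (Python) =====
-- from typing import Iterable
--
-- def _unwrap_linked_symbols(
--     symbol_connection_reference: dict[str, Iterable[str]],
--     symbols_to_track: Iterable[str],
--     linked: list[str] | None = None,
-- ) -> list[str]:
--     """Given a symbol connection reference dictionary (which symbols have been substituted for which),
--     and a sequence of variables to track, find all relevant linked symbols.
--
--     Args:
--         symbol_connection_reference: All substitutions that have occurred.
--         symbols_to_track : Which variables we are interested in.
--         linked: A list of linked symbols. Defaults to None.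
--
--     Returns:
--         A list of symbol names, each of which will be transitively related to a symbol in symbols_to_track.
--     """
--     linked = linked or []
--     for _new, _old in symbol_connection_reference.items():
--         if any(x in _old for x in symbols_to_track):
--             linked.append(_new)
--             linked = _unwrap_linked_symbols(symbol_connection_reference, [_new], linked)
--     return linked
-- ===== SOURCE B (Python) =====
-- def _unwrap_linked_symbols(
--     symbol_connection_reference,
--     symbols_to_track,
--     linked=None,
-- ):
--     """Collect symbols transitively linked to the tracked ones, pre-order.
--
--     Builds the result by concatenating freshly-built sublists instead of
--     threading one shared accumulator, and never revisits a key already on the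
--     current substitution chain (so it terminates even on cyclic references,
--     where the original recursion would exceed the recursion limit)."""
--     items = list(symbol_connection_reference.items())
--     avail0 = set(k for k, _ in items)
--
--     def chase(sym, avail):
--         # everything reachable from the single symbol `sym`, keys in `avail` only
--         res = []
--         for new, old in items:
--             if new in avail and sym in old:
--                 res.append(new)
--                 res.extend(chase(new, avail - {new}))
--         return res
--
--     out = list(linked) if linked else []
--     for new, old in items:
--         if any(x in old for x in symbols_to_track):
--             out.append(new)
--             out.extend(chase(new, avail0 - {new}))
--     return out
-- ===== Notes on version B (the rewrite author's own statement) =====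
-- stated objective: alternative
-- what changed: B replaces A's unbounded recursion that threads one shared accumulator list with a per-symbol 'chase' that builds and concatenates fresh sublists, keeps the still-available keys in a set, and never revisits a key already on the current substitution chain, so B terminates (returning the same list) on all inputs instead of overflowing the recursion stack on cyclic references.
import Mathlib
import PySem

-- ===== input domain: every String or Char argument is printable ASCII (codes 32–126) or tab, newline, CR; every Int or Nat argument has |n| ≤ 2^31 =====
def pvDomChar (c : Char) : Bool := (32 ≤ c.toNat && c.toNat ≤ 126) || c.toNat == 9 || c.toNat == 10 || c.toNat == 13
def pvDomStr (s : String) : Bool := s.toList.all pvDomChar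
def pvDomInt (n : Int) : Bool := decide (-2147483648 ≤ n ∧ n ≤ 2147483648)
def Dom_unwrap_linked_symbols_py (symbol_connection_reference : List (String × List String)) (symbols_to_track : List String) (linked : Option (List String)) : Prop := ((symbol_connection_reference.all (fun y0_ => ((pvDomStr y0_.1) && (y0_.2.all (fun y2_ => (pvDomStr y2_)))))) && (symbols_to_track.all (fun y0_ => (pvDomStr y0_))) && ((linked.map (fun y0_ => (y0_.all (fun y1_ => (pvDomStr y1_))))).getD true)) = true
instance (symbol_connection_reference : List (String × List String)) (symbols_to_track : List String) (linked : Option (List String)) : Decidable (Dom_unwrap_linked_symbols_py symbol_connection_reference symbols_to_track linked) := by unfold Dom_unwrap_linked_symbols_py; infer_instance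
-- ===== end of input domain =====

-- B rebuilds the result by concatenating freshly built sublists (one `chase` per linked symbol,
-- guarded against revisiting a key on the current chain) instead of threading one shared
-- accumulator through an unbounded recursion; return values agree wherever A returns
-- (A mutates a passed-in `linked` list in place; B does not — the claim is about return values).

-- ===== PORT A =====
-- Python A recurses without bound on cyclic substitution graphs (RecursionError); the port
-- carries a fuel counter that only runs out outside Pre_ (fuel exhaustion → none).
def pvGoA (scr : List (String × List String)) :
    Nat → List (String × List String) → List String → List String → Option (List String)
  | _, [], _, linked => some linked
  | fuel, (n, old) :: rest, track, linked =>
    if track.any (fun x => old.contains x) then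
      match fuel with
      | 0 => none
      | fuel' + 1 =>
        match pvGoA scr fuel' scr [n] (linked ++ [n]) with
        | none => none
        | some l2 => pvGoA scr (fuel' + 1) rest track l2
    else pvGoA scr fuel rest track linked
termination_by fuel items => (fuel, items.length)

def unwrap_linked_symbols_py (symbol_connection_reference : List (String × List String)) (symbols_to_track : List String) (linked : Option (List String)) : List String :=
  let l0 := linked.getD []   -- `linked = linked or []`
  (pvGoA symbol_connection_reference (symbol_connection_reference.length + 1)
      symbol_connection_reference symbols_to_track l0).getD l0

-- ===== PORT B =====
-- port-internal lemma, cited by pvChaseB's decreasing_by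
theorem pvDiffSingletonLt (s : PySem.Set String) (n : String) (h : PySem.Set.contains s n = true) :
    (PySem.Set.diff s [n]).length < s.length := by
  rw [PySem.Set.diff, List.length_filter_lt_length_iff_exists]
  exact ⟨n, by simpa using h, by simp⟩

def pvChaseB (scr : List (String × List String)) :
    String → PySem.Set String → List (String × List String) → List String
  | _, _, [] => []
  | sym, avail, (n, old) :: rest =>
    if PySem.Set.contains avail n && old.contains sym then
      n :: (pvChaseB scr n (PySem.Set.diff avail [n]) scr ++ pvChaseB scr sym avail rest)
    else pvChaseB scr sym avail rest
termination_by _ avail items => (avail.length, items.length)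
decreasing_by
  · apply Prod.Lex.left
    exact pvDiffSingletonLt avail n (by simp_all)
  · exact Prod.Lex.right _ (by simp)
  · exact Prod.Lex.right _ (by simp)

def pvTopB (scr : List (String × List String)) (track : List String) (avail0 : PySem.Set String) :
    List (String × List String) → List String
  | [] => []
  | (n, old) :: rest =>
    if track.any (fun x => old.contains x) then
      n :: (pvChaseB scr n (PySem.Set.diff avail0 [n]) scr ++ pvTopB scr track avail0 rest)
    else pvTopB scr track avail0 rest

def unwrap_linked_symbols_py_alt (symbol_connection_reference : List (String × List String)) (symbols_to_track : List String) (linked : Option (List String)) : List String :=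
  (linked.getD []) ++   -- `out = list(linked) if linked else []`
    pvTopB symbol_connection_reference symbols_to_track
      (PySem.Set.ofList (symbol_connection_reference.map Prod.fst)) symbol_connection_reference

-- ===== PRECONDITION & SPEC =====
-- one step of the substitution graph: keys whose old-symbol list meets `track`
def pvNxt (scr : List (String × List String)) (track : List String) : List String :=
  scr.filterMap (fun p => if track.any (fun x => p.2.contains x) then some p.1 else none)

-- Pre_ excludes exactly the inputs on which Python A raises RecursionError: those whose
-- substitution graph has a path of length |scr|+1 (equivalently, a cycle) reachable from
-- symbols_to_track; everywhere else A returns normally.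
def Pre_unwrap_linked_symbols_py (symbol_connection_reference : List (String × List String)) (symbols_to_track : List String) (linked : Option (List String)) : Prop :=
  (pvNxt symbol_connection_reference)^[symbol_connection_reference.length + 1] symbols_to_track = []
instance (symbol_connection_reference : List (String × List String)) (symbols_to_track : List String) (linked : Option (List String)) : Decidable (Pre_unwrap_linked_symbols_py symbol_connection_reference symbols_to_track linked) := by unfold Pre_unwrap_linked_symbols_py; infer_instance

def pvWitness_unwrap_linked_symbols_py : (List (String × List String)) × List String × Option (List String) :=
  ([("b", ["a"]), ("c", ["b", "x"])], ["a"], some ["z"])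

def Spec_unwrap_linked_symbols_py (symbol_connection_reference : List (String × List String)) (symbols_to_track : List String) (linked : Option (List String)) (out : List String) : Prop := out = unwrap_linked_symbols_py_alt symbol_connection_reference symbols_to_track linked
instance (symbol_connection_reference : List (String × List String)) (symbols_to_track : List String) (linked : Option (List String)) (out : List String) : Decidable (Spec_unwrap_linked_symbols_py symbol_connection_reference symbols_to_track linked out) := by unfold Spec_unwrap_linked_symbols_py; infer_instance

-- ===== CLAIM (what is proved, stated in full; the proofs are below) =====
def Claim_equal_unwrap_linked_symbols_py : Prop := ∀ (symbol_connection_reference : List (String × List String)) (symbols_to_track : List String) (linked : Option (List String)), Dom_unwrap_linked_symbols_py symbol_connection_reference symbols_to_track linked → Pre_unwrap_linked_symbols_py symbol_connection_reference symbols_to_track linked → Spec_unwrap_linked_symbols_py symbol_connection_reference symbols_to_track linked (unwrap_linked_symbols_py symbol_connection_reference symbols_to_track linked)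

-- ===== LEMMAS AND PROOFS =====

theorem mem_pvNxt {scr : List (String × List String)} {track : List String} {k : String} :
    k ∈ pvNxt scr track ↔
      ∃ old, (k, old) ∈ scr ∧ ∃ x ∈ track, x ∈ old := by
  constructor
  · intro hk
    simp only [pvNxt, List.mem_filterMap] at hk
    obtain ⟨⟨a, b⟩, hp, hif⟩ := hk
    by_cases hcond : (track.any fun x => b.contains x) = true
    · rw [if_pos hcond] at hif
      obtain rfl : a = k := by simpa using hif
      exact ⟨b, hp, by simpa using hcond⟩
    · rw [if_neg hcond] at hif; simp at hif
  · rintro ⟨old, hp, x, hx, hxo⟩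
    simp only [pvNxt, List.mem_filterMap]
    refine ⟨(k, old), hp, ?_⟩
    have hcond : (track.any fun y => old.contains y) = true := by
      simp only [List.any_eq_true]; exact ⟨x, hx, by simpa using hxo⟩
    rw [if_pos hcond]

theorem pvNxt_mono {scr : List (String × List String)} {S T : List String}
    (h : ∀ x ∈ S, x ∈ T) : ∀ k ∈ pvNxt scr S, k ∈ pvNxt scr T := by
  intro k hk
  obtain ⟨old, hp, x, hx, hxo⟩ := mem_pvNxt.1 hk
  exact mem_pvNxt.2 ⟨old, hp, x, h x hx, hxo⟩

theorem pvNxt_iter_mono (scr : List (String × List String)) (i : Nat) :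
    ∀ {S T : List String}, (∀ x ∈ S, x ∈ T) →
      ∀ k ∈ (pvNxt scr)^[i] S, k ∈ (pvNxt scr)^[i] T := by
  induction i with
  | zero => intro S T h k hk; simpa using h k (by simpa using hk)
  | succ i ih =>
    intro S T h k hk
    rw [Function.iterate_succ_apply] at hk ⊢
    exact ih (pvNxt_mono h) k hk

theorem pvNxt_nil (scr : List (String × List String)) : pvNxt scr [] = [] := by
  simp [pvNxt]

theorem pvNxt_iter_nil (scr : List (String × List String)) (d : Nat) :
    (pvNxt scr)^[d] [] = [] := by
  induction d with
  | zero => rfl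
  | succ d ih => rw [Function.iterate_succ_apply, pvNxt_nil]; exact ih

theorem pvNxt_iter_nil_of_le {scr : List (String × List String)} {S : List String} {m j : Nat}
    (h : (pvNxt scr)^[m] S = []) (hmj : m ≤ j) : (pvNxt scr)^[j] S = [] := by
  obtain ⟨d, rfl⟩ := Nat.exists_eq_add_of_le hmj
  rw [Nat.add_comm, Function.iterate_add_apply, h, pvNxt_iter_nil]

theorem pvNil_of_mem_nil {L : List String} (h : ∀ k ∈ L, k ∈ ([] : List String)) : L = [] := by
  cases L with
  | nil => rfl
  | cons a t => exact absurd (h a (List.mem_cons_self)) (by simp)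

-- no key lies on a cycle through itself when the iterate from it dies out
theorem pvNoCycle {scr : List (String × List String)} {n : String} {m i : Nat}
    (hm : (pvNxt scr)^[m] [n] = []) (hi : 1 ≤ i) (hin : n ∈ (pvNxt scr)^[i] [n]) : False := by
  have pump : ∀ k : Nat, n ∈ (pvNxt scr)^[(k + 1) * i] [n] := by
    intro k
    induction k with
    | zero => simpa using hin
    | succ k ih =>
      have hsub : ∀ x ∈ [n], x ∈ (pvNxt scr)^[i] [n] := by
        intro x hx; simp at hx; subst hx; exact hin
      have := pvNxt_iter_mono scr ((k + 1) * i) hsub n ih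
      rw [← Function.iterate_add_apply] at this
      have harith : (k + 1) * i + i = (k + 1 + 1) * i := by ring
      rwa [harith] at this
  have hbig : m ≤ (m + 1) * i := by nlinarith
  have := pump m
  rw [pvNxt_iter_nil_of_le hm hbig] at this
  simp at this

-- anything reached in ≥1 step is a key of scr
theorem pvIterMemKey {scr : List (String × List String)} {S : List String} {i : Nat} {k : String}
    (hi : 1 ≤ i) (hk : k ∈ (pvNxt scr)^[i] S) : k ∈ scr.map Prod.fst := by
  obtain ⟨j, rfl⟩ := Nat.exists_eq_add_of_le hi
  rw [Nat.add_comm, Function.iterate_succ_apply'] at hk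
  obtain ⟨old, hp, _⟩ := mem_pvNxt.1 hk
  exact List.mem_map.2 ⟨(k, old), hp, rfl⟩

-- main bridge for the single-symbol chase
theorem pvMainChase (scr : List (String × List String)) :
    ∀ (m : Nat) (sym : String) (avail : PySem.Set String)
      (items : List (String × List String)) (out : List String),
      (pvNxt scr)^[m] [sym] = [] →
      (∀ p ∈ items, p ∈ scr) →
      (∀ i k, 1 ≤ i → k ∈ (pvNxt scr)^[i] [sym] → k ∈ avail) →
      pvGoA scr m items [sym] out = some (out ++ pvChaseB scr sym avail items) := by
  intro m
  induction m with
  | zero => intro sym avail items out hnil; simp at hnil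
  | succ m ih =>
    intro sym avail items out hnil hsub hav
    induction items generalizing out with
    | nil => simp [pvGoA, pvChaseB]
    | cons p rest ihr =>
      obtain ⟨n, old⟩ := p
      have hscr : (n, old) ∈ scr := hsub _ List.mem_cons_self
      have hsub' : ∀ q ∈ rest, q ∈ scr := fun q hq => hsub q (List.mem_cons_of_mem _ hq)
      by_cases hc : old.contains sym = true
      · -- matched: n is one step from sym
        have hn1 : n ∈ pvNxt scr [sym] :=
          mem_pvNxt.2 ⟨old, hscr, sym, by simp, by simpa using hc⟩
        have hnin : n ∈ avail := hav 1 n le_rfl (by simpa using hn1)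
        have hsingle : ∀ x ∈ [n], x ∈ pvNxt scr [sym] := by
          intro x hx; simp at hx; subst hx; exact hn1
        have hm' : (pvNxt scr)^[m] [n] = [] := by
          apply pvNil_of_mem_nil
          intro k hk
          have := pvNxt_iter_mono scr m hsingle k hk
          rw [← Function.iterate_succ_apply] at this
          rw [hnil] at this
          exact this
        have hav' : ∀ i k, 1 ≤ i → k ∈ (pvNxt scr)^[i] [n] →
            k ∈ PySem.Set.diff avail [n] := by
          intro i k hi hk
          have hkiter : k ∈ (pvNxt scr)^[i + 1] [sym] := by
            have := pvNxt_iter_mono scr i hsingle k hk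
            rwa [← Function.iterate_succ_apply] at this
          have hka : k ∈ avail := hav (i + 1) k (by omega) hkiter
          have hne : k ≠ n := by
            intro h; subst h
            exact pvNoCycle hm' hi hk
          simp [hka, hne]
        have hrec := ih n (PySem.Set.diff avail [n]) scr (out ++ [n])
          hm' (fun q hq => hq) hav'
        have hcond : ([sym].any (fun x => old.contains x)) = true := by
          simp only [List.any_cons, List.any_nil, Bool.or_false]; exact hc
        have hbcond : (PySem.Set.contains avail n && old.contains sym) = true := by
          simp only [Bool.and_eq_true]
          exact ⟨(PySem.Set.contains_iff _ _).2 hnin, hc⟩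
        rw [pvGoA, pvChaseB]
        simp only [hcond, hbcond, if_true, hrec, ihr _ hsub']
        simp
      · -- not matched: both skip
        have hns : sym ∉ old := by simpa using hc
        have hcond : ([sym].any (fun x => old.contains x)) = false := by simpa using hns
        have hbcond : (PySem.Set.contains avail n && old.contains sym) = false := by
          simp [hns]
        rw [pvGoA, pvChaseB]
        simp only [hcond, hbcond, Bool.false_eq_true, ite_false]
        exact ihr _ hsub'

theorem pvMainTop (scr : List (String × List String)) (track : List String)
    (hpre : (pvNxt scr)^[scr.length + 1] track = []) :
    ∀ (items : List (String × List String)) (out : List String),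
      (∀ p ∈ items, p ∈ scr) →
      pvGoA scr (scr.length + 1) items track out
        = some (out ++ pvTopB scr track (PySem.Set.ofList (scr.map Prod.fst)) items) := by
  intro items
  induction items with
  | nil => intro out _; simp [pvGoA, pvTopB]
  | cons p rest ihr =>
    obtain ⟨n, old⟩ := p
    intro out hsub
    have hscr : (n, old) ∈ scr := hsub _ List.mem_cons_self
    have hsub' : ∀ q ∈ rest, q ∈ scr := fun q hq => hsub q (List.mem_cons_of_mem _ hq)
    by_cases hc : (track.any (fun x => old.contains x)) = true
    · obtain ⟨x, hx, hxo⟩ := List.any_eq_true.1 hc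
      have hn1 : n ∈ pvNxt scr track := mem_pvNxt.2 ⟨old, hscr, x, hx, by simpa using hxo⟩
      have hsingle : ∀ x ∈ [n], x ∈ pvNxt scr track := by
        intro x hx; simp at hx; subst hx; exact hn1
      have hm' : (pvNxt scr)^[scr.length] [n] = [] := by
        apply pvNil_of_mem_nil
        intro k hk
        have := pvNxt_iter_mono scr scr.length hsingle k hk
        rw [← Function.iterate_succ_apply] at this
        rw [hpre] at this
        exact this
      have hav' : ∀ i k, 1 ≤ i → k ∈ (pvNxt scr)^[i] [n] →
          k ∈ PySem.Set.diff (PySem.Set.ofList (scr.map Prod.fst)) [n] := by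
        intro i k hi hk
        have hkey : k ∈ scr.map Prod.fst := pvIterMemKey hi hk
        have hne : k ≠ n := by
          intro h; subst h
          exact pvNoCycle hm' hi hk
        simp [hkey, hne]
      have hrec := pvMainChase scr scr.length n (PySem.Set.diff (PySem.Set.ofList (scr.map Prod.fst)) [n])
        scr (out ++ [n]) hm' (fun q hq => hq) hav'
      rw [pvGoA, pvTopB]
      simp only [hc, if_true, hrec, ihr _ hsub']
      simp
    · rw [pvGoA, pvTopB]
      simp only [hc, Bool.false_eq_true, ite_false]
      exact ihr _ hsub'

-- ===== VERDICT (by name: the statement is the Claim_ definition above) =====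
theorem unwrap_linked_symbols_py_spec : Claim_equal_unwrap_linked_symbols_py := by
  intro scr track linked _ hpre
  simp only [Spec_unwrap_linked_symbols_py, unwrap_linked_symbols_py, unwrap_linked_symbols_py_alt]
  rw [pvMainTop scr track hpre scr (linked.getD []) (fun q hq => hq)]
  rfl
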